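-- pv_equiv track=rewrite | github.com/jtsimmons108/advent_of_code_2019 | day16.py | apply_fft
-- ===== SOURCE A (Python) =====
-- sequence = (0,1,0,-1)
--
-- def apply_fft(signal):
--     new_sigs = []
--     for i in range(len(signal)):
--         result = 0
--         j = 1
--         for sig in signal:
--             result += sig * sequence[j//(i + 1) % 4]
--             j+= 1
--         new_sigs.append(int(str(result)[-1]))
--
--     return new_sigs
-- ===== SOURCE B (Python) =====
-- def apply_fft(sig):
--     n = len(sig)
--     prefix = [0]
--     for v in sig:
--         prefix.append(prefix[-1] + v)
--     out = []
--     for i in range(n):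
--         step = i + 1
--         total = 0
--         for start in range(i, n, 4 * step):
--             total += prefix[min(start + step, n)] - prefix[start]
--             neg = start + 2 * step
--             if neg < n:
--                 total -= prefix[min(neg + step, n)] - prefix[neg]
--         out.append(abs(total) % 10)
--     return out
-- ===== Notes on version B (the rewrite author's own statement) =====
-- stated objective: faster
-- what changed: Replaces the per-output inner scan over the whole signal (with a tuple-indexed 0,1,0,-1 coefficient per element) by one precomputed prefix-sum array and, for each output position, a jump over the contiguous +1/-1 coefficient blocks, taking each block's sum as a difference of two prefix sums; the last digit is taken arithmetically (abs%10) instead of via str().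
import Mathlib
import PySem

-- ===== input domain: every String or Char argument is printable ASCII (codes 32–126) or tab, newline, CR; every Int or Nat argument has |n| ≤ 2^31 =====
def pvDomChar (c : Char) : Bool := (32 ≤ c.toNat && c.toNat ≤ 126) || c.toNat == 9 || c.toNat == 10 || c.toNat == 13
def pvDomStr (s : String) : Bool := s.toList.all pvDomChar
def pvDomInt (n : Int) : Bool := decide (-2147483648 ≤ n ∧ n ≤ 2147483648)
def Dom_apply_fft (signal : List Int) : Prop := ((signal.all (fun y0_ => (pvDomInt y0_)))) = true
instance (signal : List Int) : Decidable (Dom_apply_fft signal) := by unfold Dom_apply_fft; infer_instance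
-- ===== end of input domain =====

-- ===== PORT A =====
-- B replaces A's quadratic per-output scan by pref sums over the contiguous
-- +1/0/-1 coefficient blocks (measured faster); return values proved equal.

-- module constant `sequence = (0,1,0,-1)`
def pvSequence : List Int := [0, 1, 0, -1]

-- int(str(r)[-1]); str(r) is never empty and its last character is always a
-- decimal digit, so neither `getD` default is ever used
def pvLastDigit (r : Int) : Int :=
  match PySem.Str.pyGet? (PySem.Int.toStr r) (-1) with
  | some c => (PySem.Int.ofStr? (String.ofList [c])).getD 0
  | none => 0

def apply_fft (signal : List Int) : List Int :=
  (PySem.List.pyRange 0 (PySem.List.len signal) 1).foldl (fun new_sigs i =>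
    let res := signal.foldl (fun (st : Int × Int) sig =>
      -- sequence[j//(i+1) % 4]: the index is provably in [0,4), so pyGetD is exact
      (st.1 + sig * PySem.List.pyGetD pvSequence
          (PySem.Int.mod (PySem.Int.floordiv st.2 (i + 1)) 4) 0,
       st.2 + 1)) (0, 1)
    new_sigs ++ [pvLastDigit res.1]) []

-- ===== PORT B =====
def apply_fft_alt (signal : List Int) : List Int :=
  let n : Int := PySem.List.len signal
  let pref := signal.foldl (fun p v => p ++ [PySem.List.pyGetD p (-1) 0 + v]) [(0 : Int)]
  (PySem.List.pyRange 0 n 1).foldl (fun out i =>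
    let step := i + 1
    let total := (PySem.List.pyRange i n (4 * step)).foldl (fun total start =>
      let t1 := total + (PySem.List.pyGetD pref (min (start + step) n) 0
                         - PySem.List.pyGetD pref start 0)
      let neg := start + 2 * step
      if neg < n then
        t1 - (PySem.List.pyGetD pref (min (neg + step) n) 0
              - PySem.List.pyGetD pref neg 0)
      else t1) 0
    out ++ [PySem.Int.mod |total| 10]) []

-- ===== PRECONDITION & SPEC =====
def Spec_apply_fft (signal : List Int) (out : List Int) : Prop := out = apply_fft_alt signal
instance (signal : List Int) (out : List Int) : Decidable (Spec_apply_fft signal out) := by unfold Spec_apply_fft; infer_instance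

-- ===== CLAIM (what is proved, stated in full; the proofs are below) =====
def Claim_equal_apply_fft : Prop := ∀ (signal : List Int), Dom_apply_fft signal → Spec_apply_fft signal (apply_fft signal)

-- ===== LEMMAS AND PROOFS =====


-- the coefficient A reads off the tuple: sequence[j//s % 4]
def coefA (s j : Int) : Int :=
  PySem.List.pyGetD pvSequence (PySem.Int.mod (PySem.Int.floordiv j s) 4) 0

theorem coefA_of_floordiv (s j q : Int) (hs : 0 < s)
    (h : q * s ≤ j ∧ j < (q + 1) * s) :
    coefA s j = if q % 4 = 1 then 1 else if q % 4 = 3 then -1 else 0 := by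
  have hq : PySem.Int.floordiv j s = q := (PySem.Int.floordiv_eq_iff_of_pos hs).2 h
  have h4 : (0:Int) < 4 := by norm_num
  have hmod : PySem.Int.mod q 4 = q % 4 := PySem.Int.mod_eq_emod_of_pos h4
  have : q % 4 = 0 ∨ q % 4 = 1 ∨ q % 4 = 2 ∨ q % 4 = 3 := by omega
  unfold coefA
  rw [hq, hmod]
  rcases this with h0 | h0 | h0 | h0 <;> rw [h0] <;> decide

theorem foldA (s : Int) (xs : List Int) : ∀ (acc j : Int),
    (xs.foldl (fun (st : Int × Int) sig => (st.1 + sig * coefA s st.2, st.2 + 1)) (acc, j)).1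
      = acc + ∑ k ∈ Finset.range xs.length, xs.getD k 0 * coefA s (j + k) := by
  induction xs with
  | nil => intro acc j; simp
  | cons x xs ih =>
    intro acc j
    rw [List.foldl_cons, ih]
    rw [List.length_cons, Finset.sum_range_succ']
    simp only [List.getD_cons_succ, List.getD_cons_zero, Nat.cast_zero, add_zero, Nat.cast_add,
      Nat.cast_one]
    rw [add_assoc]
    congr 1
    rw [add_comm]
    congr 1
    apply Finset.sum_congr rfl
    intro k _
    congr 2
    ring

theorem toDigitsCore_last (fuel : ℕ) : ∀ (n : ℕ) (ds : List Char), 1 ≤ fuel →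
    ∃ pre, Nat.toDigitsCore 10 fuel n ds = pre ++ (n % 10).digitChar :: ds := by
  induction fuel with
  | zero => omega
  | succ fuel ih =>
    intro n ds _
    rw [Nat.toDigitsCore]
    by_cases h : n / 10 = 0
    · exact ⟨[], by simp [h]⟩
    · simp only [h]
      by_cases hf : fuel = 0
      · subst hf
        exact ⟨[], by simp [Nat.toDigitsCore]⟩
      · obtain ⟨pre, hp⟩ := ih (n / 10) ((n % 10).digitChar :: ds) (by omega)
        refine ⟨pre ++ [((n / 10) % 10).digitChar], by simp [hp]⟩

theorem toChars_getLast? (r : Int) :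
    (PySem.Int.toChars r).getLast? = some (r.natAbs % 10).digitChar := by
  unfold PySem.Int.toChars
  obtain ⟨pre, hp⟩ := toDigitsCore_last (r.natAbs + 1) r.natAbs [] (by omega)
  split_ifs with h
  · rw [show Nat.toDigits 10 r.natAbs = pre ++ [(r.natAbs % 10).digitChar] from hp]
    rw [show ('-' :: (pre ++ [(r.natAbs % 10).digitChar])) = ('-' :: pre) ++ [(r.natAbs % 10).digitChar] by simp]
    exact List.getLast?_concat
  · have : r.toNat = r.natAbs := by omega
    rw [this, show Nat.toDigits 10 r.natAbs = pre ++ [(r.natAbs % 10).digitChar] from hp]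
    exact List.getLast?_concat

theorem pvLastDigit_eq (r : Int) : pvLastDigit r = PySem.Int.mod |r| 10 := by
  have hmod : PySem.Int.mod |r| 10 = |r| % 10 := PySem.Int.mod_eq_emod_of_pos (by norm_num)
  have habs : |r| = (r.natAbs : Int) := Int.abs_eq_natAbs r
  have hget : PySem.Str.pyGet? (PySem.Int.toStr r) (-1) = some (r.natAbs % 10).digitChar := by
    unfold PySem.Str.pyGet? PySem.Chars.pyGet?
    rw [PySem.Int.toList_toStr, PySem.List.pyGet?_neg_one, toChars_getLast?]
  unfold pvLastDigit
  rw [hget, hmod, habs]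
  have h10 : r.natAbs % 10 < 10 := by omega
  rw [show ((r.natAbs : Int)) % 10 = ((r.natAbs % 10 : Nat) : Int) by push_cast; ring]
  generalize r.natAbs % 10 = a at h10 ⊢
  interval_cases a <;> decide

theorem prefix_eq (xs : List Int) :
    xs.foldl (fun p v => p ++ [PySem.List.pyGetD p (-1) 0 + v]) [(0 : Int)]
      = (List.range (xs.length + 1)).map (fun m => ((xs.take m).sum : Int)) := by
  induction xs using List.reverseRecOn with
  | nil => decide
  | append_singleton ys v ih =>
    rw [List.foldl_append, ih]
    simp only [List.foldl_cons, List.foldl_nil]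
    have hM : PySem.List.pyGetD ((List.range (ys.length+1)).map (fun m => ((ys.take m).sum : Int))) (-1) 0 = ys.sum := by
      rw [List.range_succ, List.map_append, List.map_singleton,
        PySem.List.pyGetD_neg_one_append_singleton]
      simp
    rw [List.length_append, List.length_singleton, hM]
    have hsplit : List.range (ys.length + 1 + 1) = List.range (ys.length + 1) ++ [ys.length + 1] := List.range_succ
    rw [hsplit, List.map_append]
    congr 1
    · apply List.map_congr_left
      intro m hm
      simp only [List.mem_range] at hm
      rw [List.take_append_of_le_length (by omega)]
    · simp [List.take_of_length_le]

theorem sum_take (xs : List Int) (b : Nat) (hb : b ≤ xs.length) :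
    (xs.take b).sum = ∑ k ∈ Finset.range b, xs.getD k 0 := by
  induction b with
  | zero => simp
  | succ b ih =>
    rw [List.sum_take_succ xs b (by omega), ih (by omega), Finset.sum_range_succ]
    congr 1
    exact (List.getD_eq_getElem xs 0 (by omega)).symm

theorem cf_quarter (s' t k r : Nat) (hs : 0 < s') (hr1 : 1 ≤ r) (hr4 : r ≤ 4)
    (hlo : (s' - 1) + 4*s'*t + (r-1)*s' ≤ k) (hhi : k < (s' - 1) + 4*s'*t + r*s') :
    coefA (s' : Int) ((k : Int)+1) = if r = 1 then 1 else if r = 3 then -1 else 0 := by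
  zify [hs, hr1] at hlo hhi
  have hq := coefA_of_floordiv (s' : Int) ((k:Int)+1) (4*(t:Int)+(r:Int)) (by exact_mod_cast hs)
    ⟨by nlinarith [hlo], by nlinarith [hhi]⟩
  rw [hq]
  interval_cases r <;> norm_num

theorem block_eq (signal : List Int) (s' t : Nat) (hs : 0 < s')
    (hun : (s'-1) + 4*s'*t < signal.length) :
    ((signal.take (min ((s'-1) + 4*s'*t + s') signal.length)).sum
        - (signal.take ((s'-1) + 4*s'*t)).sum)
      - (if (s'-1) + 4*s'*t + 2*s' < signal.length then
          (signal.take (min ((s'-1) + 4*s'*t + 3*s') signal.length)).sum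
            - (signal.take ((s'-1) + 4*s'*t + 2*s')).sum
         else 0)
    = ∑ k ∈ Finset.Ico ((s'-1) + 4*s'*t) (min ((s'-1) + 4*s'*t + 4*s') signal.length),
        signal.getD k 0 * coefA (s' : Int) ((k : Int)+1) := by
  set n' := signal.length with hn'
  set u := (s'-1) + 4*s'*t with hu
  set q1 := min (u + s') n' with hq1
  set q2 := min (u + 2*s') n' with hq2
  set q3 := min (u + 3*s') n' with hq3
  set q4 := min (u + 4*s') n' with hq4
  have Pd : ∀ a b : Nat, a ≤ b → b ≤ n' → (signal.take b).sum - (signal.take a).sum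
      = ∑ k ∈ Finset.Ico a b, signal.getD k 0 := by
    intro a b hab hbn
    rw [sum_take _ b hbn, sum_take _ a (le_trans hab hbn), Finset.sum_Ico_eq_sub _ hab]
  have hsplit : (∑ k ∈ Finset.Ico u q4, signal.getD k 0 * coefA (s' : Int) ((k : Int)+1))
      = (∑ k ∈ Finset.Ico u q1, signal.getD k 0 * coefA (s' : Int) ((k : Int)+1))
      + ((∑ k ∈ Finset.Ico q1 q2, signal.getD k 0 * coefA (s' : Int) ((k : Int)+1))
      + ((∑ k ∈ Finset.Ico q2 q3, signal.getD k 0 * coefA (s' : Int) ((k : Int)+1))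
      + (∑ k ∈ Finset.Ico q3 q4, signal.getD k 0 * coefA (s' : Int) ((k : Int)+1)))) := by
    rw [Finset.sum_Ico_consecutive _ (by omega) (by omega),
        Finset.sum_Ico_consecutive _ (by omega) (by omega),
        Finset.sum_Ico_consecutive _ (by omega) (by omega)]
  have e1 : (∑ k ∈ Finset.Ico u q1, signal.getD k 0 * coefA (s' : Int) ((k : Int)+1))
      = ∑ k ∈ Finset.Ico u q1, signal.getD k 0 := by
    apply Finset.sum_congr rfl
    intro k hk
    simp only [Finset.mem_Ico] at hk
    rw [cf_quarter s' t k 1 hs (by omega) (by omega) (by omega) (by omega)]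
    norm_num
  have e2 : (∑ k ∈ Finset.Ico q1 q2, signal.getD k 0 * coefA (s' : Int) ((k : Int)+1)) = 0 := by
    apply Finset.sum_eq_zero
    intro k hk
    simp only [Finset.mem_Ico] at hk
    rw [cf_quarter s' t k 2 hs (by omega) (by omega) (by omega) (by omega)]
    norm_num
  have e3 : (∑ k ∈ Finset.Ico q2 q3, signal.getD k 0 * coefA (s' : Int) ((k : Int)+1))
      = -∑ k ∈ Finset.Ico q2 q3, signal.getD k 0 := by
    rw [← Finset.sum_neg_distrib]
    apply Finset.sum_congr rfl
    intro k hk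
    simp only [Finset.mem_Ico] at hk
    rw [cf_quarter s' t k 3 hs (by omega) (by omega) (by omega) (by omega)]
    norm_num
  have e4 : (∑ k ∈ Finset.Ico q3 q4, signal.getD k 0 * coefA (s' : Int) ((k : Int)+1)) = 0 := by
    apply Finset.sum_eq_zero
    intro k hk
    simp only [Finset.mem_Ico] at hk
    rw [cf_quarter s' t k 4 hs (by omega) (by omega) (by omega) (by omega)]
    norm_num
  rw [hsplit, e1, e2, e3, e4]
  rw [Pd u q1 (by omega) (by omega)]
  by_cases hc : u + 2*s' < n'
  · rw [if_pos hc]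
    have : u + 2*s' = q2 := by omega
    rw [this, Pd q2 q3 (by omega) (by omega)]
    ring
  · rw [if_neg hc]
    have : Finset.Ico q2 q3 = ∅ := by
      apply Finset.Ico_eq_empty
      omega
    rw [this]
    simp

theorem sum_map_range (n : ℕ) (f : ℕ → ℤ) :
    ((List.range n).map f).sum = ∑ i ∈ Finset.range n, f i := by
  induction n with
  | zero => simp
  | succ n ih => rw [List.range_succ, Finset.sum_range_succ, List.map_append, List.sum_append, ih]; simp

theorem blocks_telescope (n' : Nat) (f : Nat → Int) (s' : Nat) (hs : 0 < s') (cnt : Nat) :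
    (∑ t ∈ Finset.range cnt, ∑ k ∈ Finset.Ico ((s'-1)+4*s'*t) (min ((s'-1)+4*s'*t+4*s') n'), f k)
      = ∑ k ∈ Finset.Ico (s'-1) (min ((s'-1)+4*s'*cnt) n'), f k := by
  induction cnt with
  | zero =>
    rw [Finset.sum_range_zero, Finset.Ico_eq_empty (by omega), Finset.sum_empty]
  | succ cnt ih =>
    rw [Finset.sum_range_succ, ih]
    by_cases hc : (s'-1)+4*s'*cnt < n'
    · have h1 : min ((s'-1)+4*s'*cnt) n' = (s'-1)+4*s'*cnt := by omega
      have h2 : min ((s'-1)+4*s'*(cnt+1)) n' = min ((s'-1)+4*s'*cnt+4*s') n' := by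
        congr 1
        ring
      rw [h1, h2]
      exact Finset.sum_Ico_consecutive _ (by omega) (by omega)
    · have h1 : min ((s'-1)+4*s'*cnt) n' = n' := by omega
      have h2 : min ((s'-1)+4*s'*(cnt+1)) n' = n' := by
        have : 4*s'*cnt ≤ 4*s'*(cnt+1) := by nlinarith
        omega
      have h3 : Finset.Ico ((s'-1)+4*s'*cnt) (min ((s'-1)+4*s'*cnt+4*s') n') = ∅ :=
        Finset.Ico_eq_empty (by omega)
      rw [h1, h2, h3, Finset.sum_empty, add_zero]

theorem cf_below (s' k : Nat) (hs : 0 < s') (hk : k < s' - 1) :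
    coefA (s' : Int) ((k : Int)+1) = 0 := by
  have hq := coefA_of_floordiv (s' : Int) ((k:Int)+1) 0 (by exact_mod_cast hs)
    ⟨by omega, by push_cast; omega⟩
  rw [hq]
  norm_num

-- ===== VERDICT (by name: the statement is the Claim_ definition above) =====
theorem apply_fft_spec : Claim_equal_apply_fft := by
  intro signal _
  unfold Spec_apply_fft apply_fft apply_fft_alt
  simp only [PySem.List.foldl_append_singleton_eq_map, List.nil_append, prefix_eq,
    PySem.List.len_eq]
  apply List.map_congr_left
  intro i hi
  rw [PySem.List.mem_pyRange_one] at hi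
  obtain ⟨m, rfl⟩ : ∃ m : ℕ, i = ↑m := ⟨i.toNat, by omega⟩
  have hm : m < signal.length := by exact_mod_cast hi.2
  simp only [show ∀ (s j : Int), PySem.List.pyGetD pvSequence
      (PySem.Int.mod (PySem.Int.floordiv j s) 4) 0 = coefA s j from fun _ _ => rfl]
  rw [foldA, zero_add, pvLastDigit_eq]
  congr 1
  -- B side: the block fold equals the coefficient-weighted sum
  have hLpos : (0:Int) < 4*((m:Int)+1) := by positivity
  rw [PySem.List.pyRange_of_pos _ _ hLpos, if_pos (by exact_mod_cast hm : ((m:Int) < (signal.length:Int)))]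
  rw [List.foldl_map]
  set n' := signal.length with hn'
  set cntN := (((n':Int) - ↑m + 4 * (↑m + 1) - 1) / (4 * (↑m + 1))).toNat with hcnt
  set q : Int := (((n':Int) - ↑m + 4 * (↑m + 1) - 1) / (4 * (↑m + 1))) with hqdef
  have hdiv := Int.mul_ediv_add_emod ((n':Int) - ↑m + 4 * (↑m + 1) - 1) (4 * (↑m + 1))
  have hrem0 := Int.emod_nonneg ((n':Int) - ↑m + 4 * (↑m + 1) - 1) (ne_of_gt hLpos)
  have hremlt := Int.emod_lt_of_pos ((n':Int) - ↑m + 4 * (↑m + 1) - 1) hLpos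
  have hq0 : 0 ≤ q := by
    rw [hqdef]
    apply Int.ediv_nonneg (by omega) (le_of_lt hLpos)
  have hqcast : ((cntN : Nat) : Int) = q := by rw [hcnt]; omega
  rw [← hqdef] at hdiv
  clear_value q cntN
  have hP : ∀ a : Nat, a ≤ n' →
      PySem.List.pyGetD (List.map (fun m => ((signal.take m).sum : Int)) (List.range (n' + 1))) ((a:Int)) 0
        = (signal.take a).sum := by
    intro a ha
    rw [PySem.List.pyGetD_natCast, PySem.List.getD_map_range _ _ _ _ (by omega)]
  have hcong : ∀ (acc : Int), ∀ t ∈ List.range cntN,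
      (fun (x : Int) (y : Nat) =>
        if ↑m + 4 * (↑m + 1) * (y:Int) + 2 * (↑m + 1) < ((n':Nat):Int) then
          x + (PySem.List.pyGetD (List.map (fun m => ((signal.take m).sum : Int)) (List.range (n' + 1)))
                  (min (↑m + 4 * (↑m + 1) * (y:Int) + (↑m + 1)) ((n':Nat):Int)) 0 -
               PySem.List.pyGetD (List.map (fun m => ((signal.take m).sum : Int)) (List.range (n' + 1)))
                  (↑m + 4 * (↑m + 1) * (y:Int)) 0) -
              (PySem.List.pyGetD (List.map (fun m => ((signal.take m).sum : Int)) (List.range (n' + 1)))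
                  (min (↑m + 4 * (↑m + 1) * (y:Int) + 2 * (↑m + 1) + (↑m + 1)) ((n':Nat):Int)) 0 -
               PySem.List.pyGetD (List.map (fun m => ((signal.take m).sum : Int)) (List.range (n' + 1)))
                  (↑m + 4 * (↑m + 1) * (y:Int) + 2 * (↑m + 1)) 0)
        else
          x + (PySem.List.pyGetD (List.map (fun m => ((signal.take m).sum : Int)) (List.range (n' + 1)))
                  (min (↑m + 4 * (↑m + 1) * (y:Int) + (↑m + 1)) ((n':Nat):Int)) 0 -
               PySem.List.pyGetD (List.map (fun m => ((signal.take m).sum : Int)) (List.range (n' + 1)))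
                  (↑m + 4 * (↑m + 1) * (y:Int)) 0)) acc t
      = acc + ∑ k ∈ Finset.Ico (m + 4*(m+1)*t) (min (m + 4*(m+1)*t + 4*(m+1)) n'),
          signal.getD k 0 * coefA ((m+1 : Nat) : Int) ((k : Int)+1) := by
    intro acc t ht
    rw [List.mem_range] at ht
    have htq : (t : Int) ≤ q - 1 := by omega
    have hmul : (4*((m:Int)+1)) * (t:Int) ≤ (4*((m:Int)+1)) * q - (4*((m:Int)+1)) := by
      have h1 := mul_le_mul_of_nonneg_left htq (le_of_lt hLpos)
      nlinarith [h1]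
    have hu : m + 4*(m+1)*t < n' := by
      have h2 : ((m:Int) + 4*(↑m+1)*(t:Int)) < (n':Int) := by omega
      exact_mod_cast h2
    have hb := block_eq signal (m+1) t (by omega) (by simpa using hu)
    simp only [Nat.add_sub_cancel] at hb
    rw [← hn'] at hb
    have c1 : ((m:Int) + 4*(↑m+1)*(t:Int)) = ((m + 4*(m+1)*t : Nat) : Int) := by push_cast; ring
    have c2 : min ((m:Int) + 4*(↑m+1)*(t:Int) + (↑m+1)) ((n':Nat):Int)
        = ((min (m + 4*(m+1)*t + (m+1)) n' : Nat) : Int) := by push_cast; omega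
    have c3 : ((m:Int) + 4*(↑m+1)*(t:Int) + 2*(↑m+1)) = ((m + 4*(m+1)*t + 2*(m+1) : Nat) : Int) := by
      push_cast; ring
    have c4 : min ((m:Int) + 4*(↑m+1)*(t:Int) + 2*(↑m+1) + (↑m+1)) ((n':Nat):Int)
        = ((min (m + 4*(m+1)*t + 3*(m+1)) n' : Nat) : Int) := by push_cast; omega
    dsimp only
    rw [c2, c4, c3, c1]
    by_cases hc : m + 4*(m+1)*t + 2*(m+1) < n'
    · rw [if_pos (show ((m + 4*(m+1)*t + 2*(m+1) : Nat) : Int) < ((n':Nat):Int) by exact_mod_cast hc)]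
      rw [hP _ (by omega), hP _ (by omega), hP _ (by omega), hP _ (by omega)]
      rw [if_pos hc] at hb
      omega
    · rw [if_neg (show ¬ ((m + 4*(m+1)*t + 2*(m+1) : Nat) : Int) < ((n':Nat):Int) by exact_mod_cast hc)]
      rw [hP _ (by omega), hP _ (by omega)]
      rw [if_neg hc] at hb
      omega
  rw [PySem.List.foldl_congr_mem _ _ _ 0 hcong, PySem.List.foldl_add, zero_add, sum_map_range]
  have hT := blocks_telescope n' (fun k => signal.getD k 0 * coefA ((m+1 : Nat) : Int) ((k : Int)+1))
      (m+1) (by omega) cntN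
  simp only [Nat.add_sub_cancel] at hT
  rw [hT]
  have hminN : min (m + 4*(m+1)*cntN) n' = n' := by
    have hL : (4*((m:Int)+1)) * q ≥ (n':Int) - ↑m := by omega
    have : ((m + 4*(m+1)*cntN : Nat) : Int) ≥ (n' : Int) := by
      push_cast
      rw [show ((cntN:Nat):Int) = q from hqcast]
      omega
    omega
  rw [hminN]
  rw [Finset.range_eq_Ico, ← Finset.sum_Ico_consecutive _ (Nat.zero_le m) (le_of_lt hm)]
  have hzero : (∑ k ∈ Finset.Ico 0 m, signal.getD k 0 * coefA (↑m + 1) (1 + (k:Int))) = 0 := by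
    apply Finset.sum_eq_zero
    intro k hk
    simp only [Finset.mem_Ico] at hk
    have := cf_below (m+1) k (by omega) (by omega)
    push_cast at this ⊢
    rw [show (1 + (k:Int)) = ((k:Int) + 1) by ring, this, mul_zero]
  rw [hzero, zero_add]
  congr 1
  apply Finset.sum_congr rfl
  intro k _
  rw [show ((m+1 : Nat) : Int) = (m:Int)+1 by push_cast; ring,
      show (1 + (k:Int)) = (k:Int)+1 by ring]
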